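-- pv_equiv track=rewrite | github.com/ayushkumar2601/rico-term | demo-api/app/utils.py | is_internal_ip
-- ===== SOURCE A (Python) =====
-- def is_internal_ip(url: str) -> bool:
--     """Check if URL points to internal/private IP."""
--     internal_patterns = [
--         "127.0.0.1",
--         "localhost",
--         "0.0.0.0",
--         "10.",
--         "172.16.",
--         "172.17.",
--         "172.18.",
--         "172.19.",
--         "172.20.",
--         "172.21.",
--         "172.22.",
--         "172.23.",
--         "172.24.",
--         "172.25.",
--         "172.26.",
--         "172.27.",
--         "172.28.",
--         "172.29.",
--         "172.30.",
--         "172.31.",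
--         "192.168.",
--         "169.254.169.254",  # AWS metadata
--         "metadata.google.internal",  # GCP metadata
--     ]
--
--     url_lower = url.lower()
--     for pattern in internal_patterns:
--         if pattern in url_lower:
--             return True
--
--     return False
-- ===== SOURCE B (Python) =====
-- _INTERNAL_PATTERNS = [
--     "127.0.0.1",
--     "localhost",
--     "0.0.0.0",
--     "10.",
--     "172.16.",
--     "172.17.",
--     "172.18.",
--     "172.19.",
--     "172.20.",
--     "172.21.",
--     "172.22.",
--     "172.23.",
--     "172.24.",
--     "172.25.",
--     "172.26.",
--     "172.27.",
--     "172.28.",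
--     "172.29.",
--     "172.30.",
--     "172.31.",
--     "192.168.",
--     "169.254.169.254",
--     "metadata.google.internal",
-- ]
--
--
-- def is_internal_ip(url: str) -> bool:
--     """Check if URL points to internal/private IP.
--
--     Single left-to-right scan over the lowercased URL: at each position,
--     test whether one of the patterns starts there (instead of one full
--     substring search per pattern)."""
--     s = url.lower()
--     return any(
--         s.startswith(p, i) for i in range(len(s) + 1) for p in _INTERNAL_PATTERNS
--     )
-- ===== Notes on version B (the rewrite author's own statement) =====
-- stated objective: alternative
-- what changed: Replaces the loop of 23 independent per-pattern substring searches with a single left-to-right scan over the lowercased URL that tests at each position whether any pattern starts there (positions outer, patterns inner).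
import Mathlib
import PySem

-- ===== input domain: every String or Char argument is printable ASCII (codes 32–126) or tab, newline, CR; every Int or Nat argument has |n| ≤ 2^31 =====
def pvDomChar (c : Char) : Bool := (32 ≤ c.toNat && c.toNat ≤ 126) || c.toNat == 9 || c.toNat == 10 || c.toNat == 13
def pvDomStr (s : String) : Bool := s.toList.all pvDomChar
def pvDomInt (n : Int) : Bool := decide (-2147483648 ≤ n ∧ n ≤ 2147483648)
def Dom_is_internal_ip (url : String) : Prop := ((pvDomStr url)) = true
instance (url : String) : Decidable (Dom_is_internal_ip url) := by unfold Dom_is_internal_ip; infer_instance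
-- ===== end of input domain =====

-- B replaces A's per-pattern substring searches by one left-to-right positional scan
-- of the lowercased URL (alternative decomposition, same cost class).

-- ===== PORT A =====
-- the literal pattern list of A (= B's module constant)
def internalPatterns : List String := [
  "127.0.0.1", "localhost", "0.0.0.0", "10.",
  "172.16.", "172.17.", "172.18.", "172.19.", "172.20.", "172.21.",
  "172.22.", "172.23.", "172.24.", "172.25.", "172.26.", "172.27.",
  "172.28.", "172.29.", "172.30.", "172.31.",
  "192.168.", "169.254.169.254", "metadata.google.internal"]

-- A's for-loop with early return True, else False
def aLoop (pats : List String) (s : String) : Bool :=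
  match pats with
  | [] => false
  | p :: ps => if PySem.Str.isIn p s then true else aLoop ps s

def is_internal_ip (url : String) : Bool :=
  aLoop internalPatterns (PySem.Str.lower url)

-- ===== PORT B =====
-- B's scan over positions i = 0 .. len(s): recursion over the suffix s.drop i;
-- at each position, `s.startswith(p, i)` is the prefix test on that suffix (exact for i ≥ 0).
def bScan (pats : List (List Char)) : List Char → Bool
  | [] => pats.any (fun p => p.isPrefixOf [])
  | c :: t => pats.any (fun p => p.isPrefixOf (c :: t)) || bScan pats t

def is_internal_ip_alt (url : String) : Bool :=
  bScan (internalPatterns.map String.toList) (PySem.Str.lower url).toList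

-- ===== PRECONDITION & SPEC =====
def Spec_is_internal_ip (url : String) (out : Bool) : Prop := out = is_internal_ip_alt url
instance (url : String) (out : Bool) : Decidable (Spec_is_internal_ip url out) := by unfold Spec_is_internal_ip; infer_instance

-- ===== CLAIM (what is proved, stated in full; the proofs are below) =====
def Claim_equal_is_internal_ip : Prop := ∀ (url : String), Dom_is_internal_ip url → Spec_is_internal_ip url (is_internal_ip url)

-- ===== LEMMAS AND PROOFS =====

-- B's scan finds a match iff some pattern is a prefix of some suffix
theorem bScan_iff (pats : List (List Char)) (s : List Char) :
    bScan pats s = true ↔ ∃ p ∈ pats, ∃ j, p <+: s.drop j := by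
  induction s with
  | nil =>
      simp [bScan, List.any_eq_true, List.isPrefixOf_iff_prefix]
  | cons c t ih =>
      simp only [bScan, Bool.or_eq_true, List.any_eq_true, List.isPrefixOf_iff_prefix, ih]
      constructor
      · rintro (⟨p, hp, hpre⟩ | ⟨p, hp, j, hpre⟩)
        · exact ⟨p, hp, 0, by simpa using hpre⟩
        · exact ⟨p, hp, j + 1, by simpa using hpre⟩
      · rintro ⟨p, hp, j, hpre⟩
        cases j with
        | zero => exact Or.inl ⟨p, hp, by simpa using hpre⟩
        | succ j => exact Or.inr ⟨p, hp, j, by simpa using hpre⟩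

-- A's loop is the disjunction of the substring tests
theorem aLoop_iff (pats : List String) (s : String) :
    aLoop pats s = true ↔ ∃ p ∈ pats, PySem.Str.isIn p s = true := by
  induction pats with
  | nil => simp [aLoop]
  | cons p ps ih =>
      simp only [aLoop]
      cases h : PySem.Str.isIn p s with
      | true =>
          rw [if_pos rfl]
          exact ⟨fun _ => ⟨p, List.mem_cons_self .., h⟩, fun _ => rfl⟩
      | false =>
          rw [if_neg (by simp)]
          rw [ih]
          constructor
          · rintro ⟨q, hq, hin⟩; exact ⟨q, List.mem_cons_of_mem _ hq, hin⟩
          · rintro ⟨q, hq, hin⟩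
            rcases List.mem_cons.1 hq with rfl | hq'
            · simp [PySem.Str.isIn_eq] at h hin; exact absurd hin (by simp [h])
            · exact ⟨q, hq', hin⟩

-- ===== VERDICT (by name: the statement is the Claim_ definition above) =====
theorem is_internal_ip_spec : Claim_equal_is_internal_ip := by
  intro url _
  unfold Spec_is_internal_ip is_internal_ip is_internal_ip_alt
  rw [Bool.eq_iff_iff, aLoop_iff, bScan_iff]
  constructor
  · rintro ⟨p, hp, hin⟩
    rw [PySem.Str.isIn_iff_infix] at hin
    obtain ⟨j, hpre⟩ := (PySem.Chars.exists_prefix_drop_iff_isIn _ _).2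
      ((PySem.Chars.isIn_iff_infix _ _).2 hin)
    exact ⟨p.toList, List.mem_map_of_mem hp, j, hpre⟩
  · rintro ⟨q, hq, j, hpre⟩
    obtain ⟨p, hp, rfl⟩ := List.mem_map.1 hq
    refine ⟨p, hp, ?_⟩
    rw [PySem.Str.isIn_iff_infix]
    exact (PySem.Chars.isIn_iff_infix _ _).1
      ((PySem.Chars.exists_prefix_drop_iff_isIn _ _).1 ⟨j, hpre⟩)
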